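-- pv_equiv track=rewrite | github.com/eddmpython/dartlab | src/dartlab/engines/dart/docs/sections/runtime.py | chapterTeacherTopics
-- ===== SOURCE A (Python) =====
-- def chapterTeacherTopics(rows: list[dict[str, object]]) -> dict[str, set[str]]:
--     teacher: dict[str, set[str]] = {}
--     for row in rows:
--         chapter = row["chapter"]
--         topic = row["topic"]
--         if not isinstance(chapter, str) or not isinstance(topic, str):
--             continue
--         teacher.setdefault(chapter, set()).add(topic)
--     return teacher
-- ===== SOURCE B (Python) =====
-- def chapterTeacherTopics(rows: list[dict[str, object]]) -> dict[str, set[str]]: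
--     # filter-then-group: extract the valid (chapter, topic) pairs once,
--     # dedupe chapters in first-occurrence order, then build each topic set
--     # by a comprehension over the pairs.
--     pairs = [(r["chapter"], r["topic"]) for r in rows
--              if isinstance(r["chapter"], str) and isinstance(r["topic"], str)]
--     chapters = dict.fromkeys(c for c, _ in pairs)
--     return {c: {t for cc, t in pairs if cc == c} for c in chapters}
-- ===== Notes on version B (the rewrite author's own statement) =====
-- stated objective: alternative
-- what changed: Replaces A's single incremental pass (setdefault into a growing dict of sets) with a filter-then-group decomposition: extract the valid (chapter, topic) pairs once, dedupe the chapters in first-occurrence order, then build each chapter's topic set by a comprehension over the pair list.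
import Mathlib
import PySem

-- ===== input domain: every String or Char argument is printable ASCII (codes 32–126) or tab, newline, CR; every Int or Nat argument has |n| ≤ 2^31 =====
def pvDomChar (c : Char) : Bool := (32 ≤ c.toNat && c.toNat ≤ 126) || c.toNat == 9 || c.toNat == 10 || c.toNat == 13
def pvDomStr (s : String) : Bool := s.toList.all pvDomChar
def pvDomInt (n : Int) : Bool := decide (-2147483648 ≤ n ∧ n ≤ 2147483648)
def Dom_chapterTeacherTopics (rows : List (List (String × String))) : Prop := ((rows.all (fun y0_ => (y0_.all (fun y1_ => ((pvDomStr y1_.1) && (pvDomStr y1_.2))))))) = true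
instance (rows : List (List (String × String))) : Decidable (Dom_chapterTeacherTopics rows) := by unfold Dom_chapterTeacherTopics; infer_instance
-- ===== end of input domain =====

-- B replaces A's incremental setdefault/add pass by a filter-then-group decomposition
-- (extract valid pairs, dedupe chapters, build each topic set from the pair list); alternative, not faster.


-- ===== PORT A =====
-- A: one pass; teacher.setdefault(chapter, set()).add(topic) ≡ insert chapter ↦ add (getD chapter ∅) topic.
-- Under the type convention every row value is a String, so both isinstance checks are True and the
-- 'continue' branch never fires; a missing "chapter"/"topic" key (Python KeyError) is excluded by Pre_.
def chapterTeacherTopics (rows : List (List (String × String))) : List (String × List String) :=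
  (rows.foldl (fun (teacher : PySem.Dict String (PySem.Set String)) row =>
      match (PySem.Dict.mk row).get? "chapter", (PySem.Dict.mk row).get? "topic" with
      | some chapter, some topic =>
          PySem.Dict.insert teacher chapter
            (PySem.Set.add (teacher.getD chapter PySem.Set.empty) topic)
      | _, _ => teacher)  -- unreachable inside Pre_ (KeyError in Python)
    PySem.Dict.empty).items

-- ===== PORT B =====
-- B: filter the valid (chapter, topic) pairs, dedupe chapters in first-occurrence order
-- (dict.fromkeys = PySem.List.dedup), then one set comprehension per chapter over the pairs.
-- valid-pair extraction for one row: some (chapter, topic) when both keys are present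
-- (always, inside Pre_; a missing key is Python's KeyError, excluded by Pre_)
def pvPair? (r : List (String × String)) : Option (String × String) :=
  ((PySem.Dict.mk r).get? "chapter").bind (fun chapter =>
    ((PySem.Dict.mk r).get? "topic").map (fun topic => (chapter, topic)))

def chapterTeacherTopics_alt (rows : List (List (String × String))) : List (String × List String) :=
  let pairs := rows.filterMap pvPair?
  let chapters := PySem.List.dedup (pairs.map Prod.fst)
  chapters.map (fun c =>
    (c, PySem.Set.ofList (((pairs.filter (fun p => p.1 == c))).map Prod.snd)))

-- ===== PRECONDITION & SPEC =====
-- Pre_ excludes exactly the rows on which Python's row["chapter"] / row["topic"] raises KeyError.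
def Pre_chapterTeacherTopics (rows : List (List (String × String))) : Prop :=
  ∀ r ∈ rows, ((PySem.Dict.mk r).contains "chapter") = true ∧ ((PySem.Dict.mk r).contains "topic") = true
instance (rows : List (List (String × String))) : Decidable (Pre_chapterTeacherTopics rows) := by
  unfold Pre_chapterTeacherTopics; infer_instance

def pvWitness_chapterTeacherTopics : (List (List (String × String))) :=
  [[("chapter", "c1"), ("topic", "t1")], [("chapter", "c1"), ("topic", "t2")]]

def Spec_chapterTeacherTopics (rows : List (List (String × String))) (out : List (String × List String)) : Prop := out = chapterTeacherTopics_alt rows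
instance (rows : List (List (String × String))) (out : List (String × List String)) : Decidable (Spec_chapterTeacherTopics rows out) := by unfold Spec_chapterTeacherTopics; infer_instance

-- ===== CLAIM (what is proved, stated in full; the proofs are below) =====
def Claim_equal_chapterTeacherTopics : Prop := ∀ (rows : List (List (String × String))), Dom_chapterTeacherTopics rows → Pre_chapterTeacherTopics rows → Spec_chapterTeacherTopics rows (chapterTeacherTopics rows)

-- ===== LEMMAS AND PROOFS =====

-- A's loop step, on an already-extracted pair.
def pvStep (d : PySem.Dict String (PySem.Set String)) (p : String × String) :
    PySem.Dict String (PySem.Set String) :=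
  PySem.Dict.insert d p.1 (PySem.Set.add (d.getD p.1 PySem.Set.empty) p.2)

-- A's fold over rows is the fold of pvStep over the extracted pairs.
theorem pvFoldA_eq (rows : List (List (String × String)))
    (acc : PySem.Dict String (PySem.Set String)) :
    rows.foldl (fun teacher row =>
      match (PySem.Dict.mk row).get? "chapter", (PySem.Dict.mk row).get? "topic" with
      | some chapter, some topic =>
          PySem.Dict.insert teacher chapter
            (PySem.Set.add (teacher.getD chapter PySem.Set.empty) topic)
      | _, _ => teacher) acc
    = (rows.filterMap pvPair?).foldl pvStep acc := by
  induction rows generalizing acc with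
  | nil => rfl
  | cons r rs ih =>
    cases hc : (PySem.Dict.mk r).get? "chapter" <;>
      cases ht : (PySem.Dict.mk r).get? "topic" <;>
      simp only [List.foldl_cons, List.filterMap_cons, hc, ht, pvStep, pvPair?, Option.bind, Option.map] <;>
      exact ih _

-- B's grouping of a pair list (Set.ofList = PySem.List.dedup by dedup_eq_ofList).
def pvGroup (ps : List (String × String)) : List (String × List String) :=
  (PySem.Set.ofList (ps.map Prod.fst)).map (fun c =>
    (c, PySem.Set.ofList ((ps.filter (fun p => p.1 == c)).map Prod.snd)))

theorem pvOfList_snoc {α : Type} [BEq α] (l : List α) (x : α) :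
    PySem.Set.ofList (l ++ [x]) = PySem.Set.add (PySem.Set.ofList l) x := by
  simp [PySem.Set.ofList, List.foldl_append]

theorem pvGet?_mapped (l : List String) (h : String → List String) (c : String) :
    PySem.Dict.get? (PySem.Dict.mk (l.map (fun x => (x, h x)))) c
    = if c ∈ l then some (h c) else none := by
  induction l with
  | nil => simp [PySem.Dict.get?]
  | cons x xs ih =>
    by_cases hx : x = c
    · subst hx; simp [PySem.Dict.get?_mk_cons]
    · rw [List.map_cons, PySem.Dict.get?_mk_cons]
      simp only [beq_iff_eq, hx, if_false, ih, List.mem_cons]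
      simp [Ne.symm hx]

-- the key invariant: folding A's step over a pair list yields B's grouping
theorem pvFold_step_eq (ps : List (String × String)) :
    ps.foldl pvStep PySem.Dict.empty = PySem.Dict.mk (pvGroup ps) := by
  induction ps using List.reverseRecOn with
  | nil => rfl
  | append_singleton ps p ih =>
    obtain ⟨c, t⟩ := p
    rw [List.foldl_append, List.foldl_cons, List.foldl_nil, ih]
    have hget := pvGet?_mapped (PySem.Set.ofList (ps.map Prod.fst))
      (fun x => PySem.Set.ofList ((ps.filter (fun p => p.1 == x)).map Prod.snd)) c
    have hmapfst : (ps ++ [(c, t)]).map Prod.fst = ps.map Prod.fst ++ [c] := by simp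
    by_cases hc : c ∈ ps.map Prod.fst
    · -- chapter already present: insert overwrites in place
      have hcd : c ∈ PySem.Set.ofList (ps.map Prod.fst) := (PySem.Set.mem_ofList _ _).mpr hc
      have hcontains : (PySem.Dict.mk (pvGroup ps)).contains c = true := by
        rw [PySem.Dict.contains_eq_isSome_get?]
        unfold pvGroup; rw [hget, if_pos hcd]; rfl
      have hgetD : (PySem.Dict.mk (pvGroup ps)).getD c PySem.Set.empty
          = PySem.Set.ofList ((ps.filter (fun p => p.1 == c)).map Prod.snd) := by
        rw [PySem.Dict.getD_eq_get?_getD]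
        unfold pvGroup; rw [hget, if_pos hcd]; rfl
      unfold pvStep
      rw [hgetD]
      unfold PySem.Dict.insert
      rw [if_pos hcontains]
      have hded : PySem.Set.ofList ((ps ++ [(c, t)]).map Prod.fst)
          = PySem.Set.ofList (ps.map Prod.fst) := by
        rw [hmapfst, pvOfList_snoc, PySem.Set.add_of_mem hcd]
      unfold pvGroup
      rw [hded]
      congr 1
      simp only [List.map_map]
      apply List.map_congr_left
      intro x hx
      simp only [Function.comp]
      by_cases hxc : x = c
      · subst hxc
        simp only [beq_self_eq_true, if_pos]
        congr 1
        rw [List.filter_append]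
        simp only [List.filter_cons, List.filter_nil, beq_self_eq_true, if_pos]
        rw [List.map_append, List.map_cons, List.map_nil, pvOfList_snoc]
      · have hbx : (x == c) = false := by simp [hxc]
        simp only [hbx, Bool.false_eq_true, if_false]
        have : (ps ++ [(c, t)]).filter (fun p => p.1 == x) = ps.filter (fun p => p.1 == x) := by
          rw [List.filter_append]
          simp [Ne.symm hxc]
        rw [this]
    · -- new chapter: insert appends at the end
      have hcd : c ∉ PySem.Set.ofList (ps.map Prod.fst) := fun h => hc ((PySem.Set.mem_ofList _ _).mp h)
      have hcontains : (PySem.Dict.mk (pvGroup ps)).contains c = false := by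
        rw [PySem.Dict.contains_eq_isSome_get?]
        unfold pvGroup; rw [hget, if_neg hcd]; rfl
      have hgetD : (PySem.Dict.mk (pvGroup ps)).getD c PySem.Set.empty = PySem.Set.empty := by
        rw [PySem.Dict.getD_eq_get?_getD]
        unfold pvGroup; rw [hget, if_neg hcd]; rfl
      unfold pvStep
      rw [hgetD]
      unfold PySem.Dict.insert
      rw [hcontains]
      simp only [Bool.false_eq_true, if_false]
      have hded : PySem.Set.ofList ((ps ++ [(c, t)]).map Prod.fst)
          = PySem.Set.ofList (ps.map Prod.fst) ++ [c] := by
        rw [hmapfst, pvOfList_snoc, PySem.Set.add_of_not_mem hcd]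
      have hfilt : ps.filter (fun p => p.1 == c) = [] := by
        rw [List.filter_eq_nil_iff]
        intro p hp hb
        exact hc (List.mem_map.mpr ⟨p, hp, by simpa using hb⟩)
      unfold pvGroup
      rw [hded, List.map_append]
      congr 1
      congr 1
      · apply List.map_congr_left
        intro x hx
        have hxps : x ∈ ps.map Prod.fst := (PySem.Set.mem_ofList _ _).mp hx
        have hxc : x ≠ c := fun h => hc (h ▸ hxps)
        have : (ps ++ [(c, t)]).filter (fun p => p.1 == x) = ps.filter (fun p => p.1 == x) := by
          rw [List.filter_append]
          simp [Ne.symm hxc]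
        rw [this]
      · rw [List.map_cons, List.map_nil, List.filter_append, hfilt]
        simp only [List.nil_append, List.filter_cons, beq_self_eq_true, if_pos,
          List.filter_nil]
        rfl

-- ===== VERDICT (by name: the statement is the Claim_ definition above) =====
theorem chapterTeacherTopics_spec : Claim_equal_chapterTeacherTopics := by
  intro rows _ _
  unfold Spec_chapterTeacherTopics chapterTeacherTopics chapterTeacherTopics_alt
  rw [pvFoldA_eq, pvFold_step_eq]
  simp [pvGroup, PySem.List.dedup]
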